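-- pv_equiv track=rewrite | github.com/AG-Guardian/AdventOfCode2021 | Day 18/part1.py | splittable
-- ===== SOURCE A (Python) =====
-- def splittable(string: str) -> bool:
--     if not string:
--         return False
--
--     previous = ''
--     for char in string:
--         if char.isdigit() and previous.isdigit():
--             return True
--         previous = char
--     return False
-- ===== SOURCE B (Python) =====
-- def splittable(string: str) -> bool:
--     positions = [i for i, c in enumerate(string) if c.isdigit()]
--     return any(q - p == 1 for p, q in zip(positions, positions[1:]))
-- ===== Notes on version B (the rewrite author's own statement) =====
-- stated objective: alternative
-- what changed: B first extracts the list of digit positions, then checks whether any two consecutive positions differ by 1, instead of A's single scan carrying the previous character in an accumulator.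
import Mathlib
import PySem

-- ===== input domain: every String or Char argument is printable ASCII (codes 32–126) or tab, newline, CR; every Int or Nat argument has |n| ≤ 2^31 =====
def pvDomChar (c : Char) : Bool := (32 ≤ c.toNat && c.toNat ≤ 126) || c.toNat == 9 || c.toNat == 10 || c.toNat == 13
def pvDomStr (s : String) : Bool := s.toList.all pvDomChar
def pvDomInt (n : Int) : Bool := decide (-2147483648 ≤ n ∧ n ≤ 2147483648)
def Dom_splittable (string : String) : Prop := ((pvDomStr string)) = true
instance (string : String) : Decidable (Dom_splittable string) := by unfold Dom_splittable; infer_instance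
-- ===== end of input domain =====

-- B extracts the digit positions first, then checks whether two consecutive positions differ by 1,
-- instead of A's single scan carrying the previous character (alternative decomposition; same behaviour).

-- ===== PORT A =====
-- the for-loop with the 'previous' accumulator (a string: "" initially, then the last char)
def splittableLoop : List Char → String → Bool
  | [], _ => false
  | c :: rest, previous =>
      if PySem.Chars.isdigit c && PySem.Str.strIsdigit previous then true
      else splittableLoop rest (String.ofList [c])

def splittable (string : String) : Bool :=
  if string.toList = [] then false
  else splittableLoop string.toList ""

-- ===== PORT B =====
def splittable_alt (string : String) : Bool :=
  let positions : List Int :=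
    ((PySem.List.enumerate string.toList 0).filter (fun p => PySem.Chars.isdigit p.2)).map (·.1)
  (positions.zip (positions.drop 1)).any (fun q => q.2 - q.1 == 1)

-- ===== PRECONDITION & SPEC =====
def Spec_splittable (string : String) (out : Bool) : Prop := out = splittable_alt string
instance (string : String) (out : Bool) : Decidable (Spec_splittable string out) := by unfold Spec_splittable; infer_instance

-- ===== CLAIM (what is proved, stated in full; the proofs are below) =====
def Claim_equal_splittable : Prop := ∀ (string : String), Dom_splittable string → Spec_splittable string (splittable string)

-- ===== LEMMAS AND PROOFS =====

-- proof-side recursion: the digit-position list starting at index n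
def digitPos : List Char → Int → List Int
  | [], _ => []
  | c :: rest, n =>
      if PySem.Chars.isdigit c then n :: digitPos rest (n + 1) else digitPos rest (n + 1)

-- proof-side recursion: "has two adjacent digits"
def hasAdj : List Char → Bool
  | c :: d :: rest => (PySem.Chars.isdigit c && PySem.Chars.isdigit d) || hasAdj (d :: rest)
  | _ => false

-- "some consecutive pair of positions differs by 1"
def gapOne (xs : List Int) : Bool :=
  (xs.zip (xs.drop 1)).any (fun q => q.2 - q.1 == 1)

theorem digitPos_eq_filterMap (l : List Char) (n : Int) :
    ((PySem.List.enumerate l n).filter (fun p => PySem.Chars.isdigit p.2)).map (·.1)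
      = digitPos l n := by
  induction l generalizing n with
  | nil => simp [PySem.List.enumerate_nil, digitPos]
  | cons c rest ih =>
    simp only [PySem.List.enumerate_cons, List.filter_cons, digitPos]
    by_cases h : PySem.Chars.isdigit c = true <;> simp [h, ih]

theorem digitPos_mem_le (l : List Char) (n : Int) (x : Int) (hx : x ∈ digitPos l n) : n ≤ x := by
  induction l generalizing n with
  | nil => simp [digitPos] at hx
  | cons c rest ih =>
    simp only [digitPos] at hx
    by_cases h : PySem.Chars.isdigit c = true
    · simp [h] at hx
      rcases hx with rfl | hx
      · exact le_refl x
      · have := ih (n + 1) hx; omega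
    · simp [h] at hx
      have := ih (n + 1) hx; omega

theorem strIsdigit_single (c : Char) :
    PySem.Str.strIsdigit (String.ofList [c]) = PySem.Chars.isdigit c := by
  simp [PySem.Str.strIsdigit, PySem.Chars.strIsdigit, String.toList_ofList]

theorem gapOne_digitPos (l : List Char) (n : Int) : gapOne (digitPos l n) = hasAdj l := by
  induction l generalizing n with
  | nil => simp [digitPos, gapOne, hasAdj]
  | cons c rest ih =>
    by_cases hc : PySem.Chars.isdigit c = true
    · cases rest with
      | nil => simp [digitPos, gapOne, hasAdj, hc]
      | cons d rest' =>
        by_cases hd : PySem.Chars.isdigit d = true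
        · simp [digitPos, hc, hd, gapOne, hasAdj]
        · -- first position n is followed by positions ≥ n + 2
          have htail : digitPos (d :: rest') (n + 1) = digitPos rest' (n + 2) := by
            simp [digitPos, hd]; ring_nf
          have hhead : digitPos (c :: d :: rest') n = n :: digitPos rest' (n + 2) := by
            simp [digitPos, hc, hd]; ring_nf
          have hrest : gapOne (digitPos rest' (n + 2)) = hasAdj rest' := by
            have h1 := ih (n := n + 1)
            rw [htail] at h1
            rw [h1]
            cases rest' with
            | nil => simp [hasAdj]
            | cons e rest'' => simp [hasAdj, hd]
          have hstep : gapOne (n :: digitPos rest' (n + 2)) = gapOne (digitPos rest' (n + 2)) := by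
            cases hl : digitPos rest' (n + 2) with
            | nil => simp [gapOne]
            | cons x xs =>
              have hx : n + 2 ≤ x := digitPos_mem_le rest' (n + 2) x (by rw [hl]; simp)
              simp only [gapOne, List.drop_succ_cons, List.drop_zero, List.zip_cons_cons,
                List.any_cons]
              have : (x - n == 1) = false := by simp; omega
              rw [this]; simp
          rw [hhead, hstep, hrest]
          cases rest' with
          | nil => simp [hasAdj, hd]
          | cons e rest'' => simp [hasAdj, hd]
    · cases rest with
      | nil => simp [digitPos, gapOne, hasAdj, hc]
      | cons d rest' =>
        have : hasAdj (c :: d :: rest') = hasAdj (d :: rest') := by simp [hasAdj, hc]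
        rw [this, ← ih (n := n + 1)]
        simp [digitPos, hc]

theorem splittableLoop_eq (l : List Char) (p : Char) :
    splittableLoop l (String.ofList [p]) =
      ((match l with
        | [] => false
        | c :: _ => PySem.Chars.isdigit c && PySem.Chars.isdigit p) || hasAdj l) := by
  induction l generalizing p with
  | nil => simp [splittableLoop, hasAdj]
  | cons c rest ih =>
    simp only [splittableLoop, strIsdigit_single]
    cases rest with
    | nil => simp [splittableLoop, hasAdj, Bool.and_comm]
    | cons d rest' =>
      rw [ih]
      cases hc : PySem.Chars.isdigit c <;> cases hp : PySem.Chars.isdigit p <;>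
        simp [hasAdj, hc]

theorem splittable_eq_hasAdj (s : String) : splittable s = hasAdj s.toList := by
  unfold splittable
  cases h : s.toList with
  | nil => simp [hasAdj]
  | cons c rest =>
    simp only [reduceCtorEq, if_false]
    have h0 : PySem.Str.strIsdigit "" = false := by decide
    cases rest with
    | nil =>
      have : splittableLoop [c] "" = false := by
        rw [splittableLoop, h0]; simp [splittableLoop]
      simp [this, hasAdj]
    | cons d rest' =>
      have step : splittableLoop (c :: d :: rest') "" = splittableLoop (d :: rest') (String.ofList [c]) := by
        rw [splittableLoop, h0]; simp
      rw [step, splittableLoop_eq]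
      cases hc : PySem.Chars.isdigit c <;> cases hd : PySem.Chars.isdigit d <;>
        simp [hasAdj, hc, hd]

-- ===== VERDICT (by name: the statement is the Claim_ definition above) =====
theorem splittable_spec : Claim_equal_splittable := by
  intro s _
  unfold Spec_splittable splittable_alt
  rw [splittable_eq_hasAdj, digitPos_eq_filterMap]
  exact (gapOne_digitPos s.toList 0).symm
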